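-- pv_equiv track=rewrite | github.com/gouda64/neural-chain-preimage-attack | src/fuzzy/bytehash.py | sha1bytes
-- ===== SOURCE A (Python) =====
-- def int2bytes(x, n=4):
--     b = [0] * n
--     for i in range(n):
--         b[i] = x & 0xFF
--         x >>= 8
--     return b
--
-- def bytes2int(bytes):
--     s = 0
--     l = len(bytes)
--     for i in range(l):
--         s <<= 8
--         s += bytes[l-1-i]
--     return s
--
-- def lebe(bytes):
--     bytes = list(bytes) # copy
--     l = len(bytes)
--     for i in range(l >> 1):
--         bytes[i], bytes[l-1-i] = bytes[l-1-i], bytes[i]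
--     return bytes
--
-- def rotl(d, n):
--     return ((d << n) & 0xFFFFFFFF) | (d >> (0x20 - n))
--
-- def sha1bytes(bytes, rounds=0x50):
--     k1 = 0x5A827999
--     k2 = 0x6ED9EBA1
--     k3 = 0x8F1BBCDC
--     k4 = 0xCA62C1D6
--
--     h0 = 0x67452301
--     h1 = 0xEFCDAB89
--     h2 = 0x98BADCFE
--     h3 = 0x10325476
--     h4 = 0xC3D2E1F0
--
--     msglen = len(bytes) << 3 # length in bits
--     bytes = list(bytes) # copy
--
--     bytes += [0x80]
--     bytes += [0] * ((0x38 - len(bytes)) & 0x3F)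
--     bytes += lebe(int2bytes(msglen, 8)) # now len(bytes) mod 64 = 0
--
--     n = len(bytes) >> 6
--
--     w = [0] * 0x50
--
--     for i in range(n):
--         a, b, c, d, e = h0, h1, h2, h3, h4
--
--         chunk = bytes[(i<<6):((i+1)<<6)]
--
--         for j in range(0, min(0x10, rounds)):
--             w[j] = bytes2int(lebe(chunk[(j<<2):((j+1)<<2)]))
--             f = d ^ (b & (c ^ d))
--             a, e, d, c, b  = (rotl(a, 5) + f + e + k1 + w[j]) & 0xFFFFFFFF, d, c, rotl(b, 0x1E), a
--         for j in range(0x10, min(0x14, rounds)):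
--             w[j] = rotl(w[j-3] ^ w[j-8] ^ w[j-0xE] ^ w[j-0x10], 1)
--             f = d ^ (b & (c ^ d))
--             a, e, d, c, b  = (rotl(a, 5) + f + e + k1 + w[j]) & 0xFFFFFFFF, d, c, rotl(b, 0x1E), a
--         for j in range(0x14, min(0x28, rounds)):
--             w[j] = rotl(w[j-3] ^ w[j-8] ^ w[j-0xE] ^ w[j-0x10], 1)
--             f = b ^ c ^ d
--             a, e, d, c, b  = (rotl(a, 5) + f + e + k2 + w[j]) & 0xFFFFFFFF, d, c, rotl(b, 0x1E), a
--         for j in range(0x28, min(0x3C, rounds)):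
--             w[j] = rotl(w[j-3] ^ w[j-8] ^ w[j-0xE] ^ w[j-0x10], 1)
--             f = (b & c) | (b & d) | (c & d)
--             a, e, d, c, b  = (rotl(a, 5) + f + e + k3 + w[j]) & 0xFFFFFFFF, d, c, rotl(b, 0x1E), a
--         for j in range(0x3C, min(0x50, rounds)):
--             w[j] = rotl(w[j-3] ^ w[j-8] ^ w[j-0xE] ^ w[j-0x10], 1)
--             f = b ^ c ^ d
--             a, e, d, c, b  = (rotl(a, 5) + f + e + k4 + w[j]) & 0xFFFFFFFF, d, c, rotl(b, 0x1E), a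
--
--         h0, h1, h2, h3, h4 = (h0 + a) & 0xFFFFFFFF, (h1 + b) & 0xFFFFFFFF, (h2 + c) & 0xFFFFFFFF, (h3 + d) & 0xFFFFFFFF, (h4 + e) & 0xFFFFFFFF
--
--     return lebe(int2bytes(h0)) + lebe(int2bytes(h1)) + lebe(int2bytes(h2)) + lebe(int2bytes(h3)) + lebe(int2bytes(h4)) # concatenation
-- ===== SOURCE B (Python) =====
-- def int2bytes(x, n=4):
--     b = [0] * n
--     for i in range(n):
--         b[i] = x & 0xFF
--         x >>= 8
--     return b
--
-- def bytes2int(bytes):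
--     s = 0
--     l = len(bytes)
--     for i in range(l):
--         s <<= 8
--         s += bytes[l-1-i]
--     return s
--
-- def lebe(bytes):
--     bytes = list(bytes) # copy
--     l = len(bytes)
--     for i in range(l >> 1):
--         bytes[i], bytes[l-1-i] = bytes[l-1-i], bytes[i]
--     return bytes
--
-- def rotl(d, n):
--     return ((d << n) & 0xFFFFFFFF) | (d >> (0x20 - n))
--
-- def sha1bytes(bytes, rounds=0x50):
--     k1 = 0x5A827999
--     k2 = 0x6ED9EBA1
--     k3 = 0x8F1BBCDC
--     k4 = 0xCA62C1D6
--
--     msg = list(bytes)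
--     msglen = len(msg) << 3
--     msg += [0x80]
--     msg += [0] * ((0x38 - len(msg)) & 0x3F)
--     msg += lebe(int2bytes(msglen, 8))
--
--     limit = min(0x50, max(0, rounds))
--
--     h0, h1, h2, h3, h4 = 0x67452301, 0xEFCDAB89, 0x98BADCFE, 0x10325476, 0xC3D2E1F0
--
--     for i in range(len(msg) >> 6):
--         chunk = msg[(i << 6):((i + 1) << 6)]
--
--         # stage 1: the whole (rounds-truncated) message schedule
--         w = []
--         for j in range(limit):
--             if j < 0x10:
--                 w.append(bytes2int(lebe(chunk[(j << 2):((j + 1) << 2)])))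
--             else:
--                 w.append(rotl(w[j-3] ^ w[j-8] ^ w[j-0xE] ^ w[j-0x10], 1))
--
--         # stage 2: the append-only round-output sequence s, where the working
--         # registers are pure reads of earlier sequence elements:
--         #   a_t = s[t+4], b_t = s[t+3], c_t = rotl(s[t+2], 30),
--         #   d_t = rotl(s[t+1], 30), e_t = rotl(s[t], 30)
--         s = [rotl(h4, 2), rotl(h3, 2), rotl(h2, 2), h1, h0]
--         for t in range(limit):
--             a, b = s[t+4], s[t+3]
--             c, d, e = rotl(s[t+2], 0x1E), rotl(s[t+1], 0x1E), rotl(s[t], 0x1E)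
--             if t < 0x14:
--                 f, k = d ^ (b & (c ^ d)), k1
--             elif t < 0x28:
--                 f, k = b ^ c ^ d, k2
--             elif t < 0x3C:
--                 f, k = (b & c) | (b & d) | (c & d), k3
--             else:
--                 f, k = b ^ c ^ d, k4
--             s.append((rotl(a, 5) + f + e + k + w[t]) & 0xFFFFFFFF)
--
--         h0 = (h0 + s[limit+4]) & 0xFFFFFFFF
--         h1 = (h1 + s[limit+3]) & 0xFFFFFFFF
--         h2 = (h2 + rotl(s[limit+2], 0x1E)) & 0xFFFFFFFF
--         h3 = (h3 + rotl(s[limit+1], 0x1E)) & 0xFFFFFFFF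
--         h4 = (h4 + rotl(s[limit], 0x1E)) & 0xFFFFFFFF
--
--     return lebe(int2bytes(h0)) + lebe(int2bytes(h1)) + lebe(int2bytes(h2)) + lebe(int2bytes(h3)) + lebe(int2bytes(h4))
-- ===== Notes on version B (the rewrite author's own statement) =====
-- stated objective: alternative
-- what changed: A interleaves schedule and compression in five quarter loops that rotate a 5-register working tuple (a,b,c,d,e) every round; B first builds the truncated message schedule, then replaces the rotating registers entirely by the append-only round-output sequence s (a_t = s[t+4], b_t = s[t+3], c/d/e = rotl30 of earlier s entries), appending one word per round and reading the final registers out of the sequence.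
import Mathlib
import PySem

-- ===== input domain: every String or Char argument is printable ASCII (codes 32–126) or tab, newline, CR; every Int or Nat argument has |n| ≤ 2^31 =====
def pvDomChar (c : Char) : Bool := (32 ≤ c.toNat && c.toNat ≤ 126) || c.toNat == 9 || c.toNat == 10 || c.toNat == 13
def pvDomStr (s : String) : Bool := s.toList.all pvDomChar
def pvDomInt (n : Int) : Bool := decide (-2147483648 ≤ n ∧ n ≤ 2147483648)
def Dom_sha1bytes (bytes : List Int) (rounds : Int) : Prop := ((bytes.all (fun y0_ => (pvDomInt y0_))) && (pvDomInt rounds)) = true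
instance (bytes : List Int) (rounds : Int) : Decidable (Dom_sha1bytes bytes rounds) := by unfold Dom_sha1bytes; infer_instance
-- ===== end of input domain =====

-- B stages the truncated message schedule first and replaces A's rotating 5-register working
-- state by the append-only round-output sequence (registers = reads/rotations of earlier entries).

-- ===== PORT A =====
-- helpers shared by both Pythons (module-level in bytehash.py)
def int2bytes (x : Int) (n : Int) : List Int :=
  ((PySem.List.pyRange 0 n).foldl
    (fun (st : List Int × Int) i =>
      (PySem.List.pySetD st.1 i (PySem.Int.band st.2 0xFF), st.2 >>> (8:Nat)))
    (PySem.List.pyRepeat [0] n, x)).1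

def bytes2int (bs : List Int) : Int :=
  let l := PySem.List.len bs
  (PySem.List.pyRange 0 l).foldl
    (fun s i => (s <<< (8:Nat)) + PySem.List.pyGetD bs (l - 1 - i) 0) 0

def lebe (bs : List Int) : List Int :=
  let l := PySem.List.len bs
  (PySem.List.pyRange 0 (l >>> (1:Nat))).foldl
    (fun b i =>
      let x := PySem.List.pyGetD b (l - 1 - i) 0
      let y := PySem.List.pyGetD b i 0
      PySem.List.pySetD (PySem.List.pySetD b i x) (l - 1 - i) y) bs

-- rotl(d, n): every call site uses the literal n = 1, 2, 5 or 0x1E, so .toNat is exact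
def rotl (d : Int) (n : Int) : Int :=
  PySem.Int.bor (PySem.Int.band (d <<< n.toNat) 0xFFFFFFFF) (d >>> ((0x20 - n).toNat))

def kc1 : Int := 0x5A827999
def kc2 : Int := 0x6ED9EBA1
def kc3 : Int := 0x8F1BBCDC
def kc4 : Int := 0xCA62C1D6

-- f = d ^ (b & (c ^ d));  f = b ^ c ^ d;  f = (b & c) | (b & d) | (c & d)
def fch (b c d : Int) : Int := PySem.Int.bxor d (PySem.Int.band b (PySem.Int.bxor c d))
def fpar (b c d : Int) : Int := PySem.Int.bxor (PySem.Int.bxor b c) d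
def fmaj (b c d : Int) : Int :=
  PySem.Int.bor (PySem.Int.bor (PySem.Int.band b c) (PySem.Int.band b d)) (PySem.Int.band c d)

-- w[j] = bytes2int(lebe(chunk[(j<<2):((j+1)<<2)]))
def msgword (chunk : List Int) (j : Int) : Int :=
  bytes2int (lebe (PySem.List.slice chunk (some (j <<< (2:Nat))) (some ((j + 1) <<< (2:Nat)))))

-- rotl(w[j-3] ^ w[j-8] ^ w[j-0xE] ^ w[j-0x10], 1)
def schedword (w : List Int) (j : Int) : Int :=
  rotl (PySem.Int.bxor (PySem.Int.bxor (PySem.Int.bxor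
    (PySem.List.pyGetD w (j - 3) 0) (PySem.List.pyGetD w (j - 8) 0))
    (PySem.List.pyGetD w (j - 0xE) 0)) (PySem.List.pyGetD w (j - 0x10) 0)) 1

abbrev St := Int × Int × Int × Int × Int

-- a, e, d, c, b = (rotl(a,5) + f + e + k + wj) & 0xFFFFFFFF, d, c, rotl(b, 0x1E), a
def roundUpd (q : St) (f k wj : Int) : St :=
  (PySem.Int.band (rotl q.1 5 + f + q.2.2.2.2 + k + wj) 0xFFFFFFFF,
   q.1, rotl q.2.1 0x1E, q.2.2.1, q.2.2.2.1)

-- one iteration of A's first quarter loop (w[j] from the chunk)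
def stepAm (chunk : List Int) (q : St × List Int) (j : Int) : St × List Int :=
  let wj := msgword chunk j
  (roundUpd q.1 (fch q.1.2.1 q.1.2.2.1 q.1.2.2.2.1) kc1 wj, PySem.List.pySetD q.2 j wj)

-- one iteration of A's later loops (w[j] from the recurrence; f, k fixed per loop)
def stepAs (f : Int → Int → Int → Int) (k : Int) (q : St × List Int) (j : Int) : St × List Int :=
  let wj := schedword q.2 j
  (roundUpd q.1 (f q.1.2.1 q.1.2.2.1 q.1.2.2.2.1) k wj, PySem.List.pySetD q.2 j wj)

-- one iteration of A's outer block loop: state = (h0..h4, w)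
def blockA (bs : List Int) (rounds : Int) (st : St × List Int) (i : Int) : St × List Int :=
  let chunk := PySem.List.slice bs (some (i <<< (6:Nat))) (some ((i + 1) <<< (6:Nat)))
  let s1 := (PySem.List.pyRange 0 (min 0x10 rounds)).foldl (stepAm chunk) st
  let s2 := (PySem.List.pyRange 0x10 (min 0x14 rounds)).foldl (stepAs fch kc1) s1
  let s3 := (PySem.List.pyRange 0x14 (min 0x28 rounds)).foldl (stepAs fpar kc2) s2
  let s4 := (PySem.List.pyRange 0x28 (min 0x3C rounds)).foldl (stepAs fmaj kc3) s3
  let s5 := (PySem.List.pyRange 0x3C (min 0x50 rounds)).foldl (stepAs fpar kc4) s4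
  ((PySem.Int.band (st.1.1 + s5.1.1) 0xFFFFFFFF,
    PySem.Int.band (st.1.2.1 + s5.1.2.1) 0xFFFFFFFF,
    PySem.Int.band (st.1.2.2.1 + s5.1.2.2.1) 0xFFFFFFFF,
    PySem.Int.band (st.1.2.2.2.1 + s5.1.2.2.2.1) 0xFFFFFFFF,
    PySem.Int.band (st.1.2.2.2.2 + s5.1.2.2.2.2) 0xFFFFFFFF), s5.2)

def pad (bytes : List Int) : List Int :=
  let msglen := PySem.List.len bytes <<< (3:Nat)
  let b1 := bytes ++ [0x80]
  let b2 := b1 ++ PySem.List.pyRepeat [0] (PySem.Int.band (0x38 - PySem.List.len b1) 0x3F)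
  b2 ++ lebe (int2bytes msglen 8)

def sha1bytes (bytes : List Int) (rounds : Int) : List Int :=
  let bs := pad bytes
  let n := PySem.List.len bs >>> (6:Nat)
  let fin := (PySem.List.pyRange 0 n).foldl (blockA bs rounds)
    ((0x67452301, 0xEFCDAB89, 0x98BADCFE, 0x10325476, 0xC3D2E1F0),
     PySem.List.pyRepeat [0] 0x50)
  lebe (int2bytes fin.1.1 4) ++ lebe (int2bytes fin.1.2.1 4) ++ lebe (int2bytes fin.1.2.2.1 4)
    ++ lebe (int2bytes fin.1.2.2.2.1 4) ++ lebe (int2bytes fin.1.2.2.2.2 4)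

-- ===== PORT B =====
-- stage 1: one schedule-building step — w.append(msg word or recurrence word)
def bstep (chunk : List Int) (w : List Int) (j : Int) : List Int :=
  w ++ [if j < 0x10 then msgword chunk j else schedword w j]

-- stage 2: one round — read the registers out of the sequence s and append the new word
def sstep (w : List Int) (s : List Int) (t : Int) : List Int :=
  let a := PySem.List.pyGetD s (t + 4) 0
  let b := PySem.List.pyGetD s (t + 3) 0
  let c := rotl (PySem.List.pyGetD s (t + 2) 0) 0x1E
  let d := rotl (PySem.List.pyGetD s (t + 1) 0) 0x1E
  let e := rotl (PySem.List.pyGetD s t 0) 0x1E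
  let fk : Int × Int :=
    if t < 0x14 then (fch b c d, kc1)
    else if t < 0x28 then (fpar b c d, kc2)
    else if t < 0x3C then (fmaj b c d, kc3)
    else (fpar b c d, kc4)
  s ++ [PySem.Int.band (rotl a 5 + fk.1 + e + fk.2 + PySem.List.pyGetD w t 0) 0xFFFFFFFF]

def blockB (bs : List Int) (limit : Int) (h : St) (i : Int) : St :=
  let chunk := PySem.List.slice bs (some (i <<< (6:Nat))) (some ((i + 1) <<< (6:Nat)))
  let w := (PySem.List.pyRange 0 limit).foldl (bstep chunk) []
  let s0 : List Int := [rotl h.2.2.2.2 2, rotl h.2.2.2.1 2, rotl h.2.2.1 2, h.2.1, h.1]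
  let s := (PySem.List.pyRange 0 limit).foldl (sstep w) s0
  (PySem.Int.band (h.1 + PySem.List.pyGetD s (limit + 4) 0) 0xFFFFFFFF,
   PySem.Int.band (h.2.1 + PySem.List.pyGetD s (limit + 3) 0) 0xFFFFFFFF,
   PySem.Int.band (h.2.2.1 + rotl (PySem.List.pyGetD s (limit + 2) 0) 0x1E) 0xFFFFFFFF,
   PySem.Int.band (h.2.2.2.1 + rotl (PySem.List.pyGetD s (limit + 1) 0) 0x1E) 0xFFFFFFFF,
   PySem.Int.band (h.2.2.2.2 + rotl (PySem.List.pyGetD s limit 0) 0x1E) 0xFFFFFFFF)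

def sha1bytes_alt (bytes : List Int) (rounds : Int) : List Int :=
  let bs := pad bytes
  let limit := min 0x50 (max 0 rounds)
  let fin := (PySem.List.pyRange 0 (PySem.List.len bs >>> (6:Nat))).foldl (blockB bs limit)
    (0x67452301, 0xEFCDAB89, 0x98BADCFE, 0x10325476, 0xC3D2E1F0)
  lebe (int2bytes fin.1 4) ++ lebe (int2bytes fin.2.1 4) ++ lebe (int2bytes fin.2.2.1 4)
    ++ lebe (int2bytes fin.2.2.2.1 4) ++ lebe (int2bytes fin.2.2.2.2 4)

-- ===== PRECONDITION & SPEC =====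
def Spec_sha1bytes (bytes : List Int) (rounds : Int) (out : List Int) : Prop := out = sha1bytes_alt bytes rounds
instance (bytes : List Int) (rounds : Int) (out : List Int) : Decidable (Spec_sha1bytes bytes rounds out) := by unfold Spec_sha1bytes; infer_instance

-- ===== CLAIM (what is proved, stated in full; the proofs are below) =====
def Claim_equal_sha1bytes : Prop := ∀ (bytes : List Int) (rounds : Int), Dom_sha1bytes bytes rounds → Spec_sha1bytes bytes rounds (sha1bytes bytes rounds)

-- ===== LEMMAS AND PROOFS =====
set_option maxHeartbeats 1000000

def fsel (j : Int) (b c d : Int) : Int :=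
  if j < 0x14 then fch b c d else if j < 0x28 then fpar b c d
  else if j < 0x3C then fmaj b c d else fpar b c d

def ksel (j : Int) : Int :=
  if j < 0x14 then kc1 else if j < 0x28 then kc2 else if j < 0x3C then kc3 else kc4

def stepU (chunk : List Int) (q : St × List Int) (j : Int) : St × List Int :=
  let wj := if j < 0x10 then msgword chunk j else schedword q.2 j
  (roundUpd q.1 (fsel j q.1.2.1 q.1.2.2.1 q.1.2.2.2.1) (ksel j) wj, PySem.List.pySetD q.2 j wj)

-- tuple-state compression round (proof-side intermediate between A's fused loops and B's sequence)
def compress (w : List Int) (q : St) (j : Int) : St :=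
  roundUpd q (fsel j q.2.1 q.2.2.1 q.2.2.2.1) (ksel j) (PySem.List.pyGetD w j 0)

def blockT (bs : List Int) (limit : Int) (h : St) (i : Int) : St :=
  let chunk := PySem.List.slice bs (some (i <<< (6:Nat))) (some ((i + 1) <<< (6:Nat)))
  let w := (PySem.List.pyRange 0 limit).foldl (bstep chunk) []
  let s := (PySem.List.pyRange 0 limit).foldl (compress w) h
  (PySem.Int.band (h.1 + s.1) 0xFFFFFFFF,
   PySem.Int.band (h.2.1 + s.2.1) 0xFFFFFFFF,
   PySem.Int.band (h.2.2.1 + s.2.2.1) 0xFFFFFFFF,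
   PySem.Int.band (h.2.2.2.1 + s.2.2.2.1) 0xFFFFFFFF,
   PySem.Int.band (h.2.2.2.2 + s.2.2.2.2) 0xFFFFFFFF)

lemma seg (x y z r : Int) (hxy : x ≤ y) (hyz : y ≤ z) :
    PySem.List.pyRange x (min z r) = PySem.List.pyRange x (min y r) ++ PySem.List.pyRange y (min z r) := by
  by_cases h : r ≤ y
  · have h1 : min z r = min y r := by omega
    rw [h1, PySem.List.pyRange_one_eq_nil (show min y r ≤ y by omega), List.append_nil]
  · have h1 : min y r = y := by omega
    rw [h1, PySem.List.pyRange_one_append x y (min z r) hxy (by omega)]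

lemma chain_eq (chunk : List Int) (r : Int) (q : St × List Int) :
    (PySem.List.pyRange 0x3C (min 0x50 r)).foldl (stepAs fpar kc4)
      ((PySem.List.pyRange 0x28 (min 0x3C r)).foldl (stepAs fmaj kc3)
        ((PySem.List.pyRange 0x14 (min 0x28 r)).foldl (stepAs fpar kc2)
          ((PySem.List.pyRange 0x10 (min 0x14 r)).foldl (stepAs fch kc1)
            ((PySem.List.pyRange 0 (min 0x10 r)).foldl (stepAm chunk) q))))
    = (PySem.List.pyRange 0 (min 0x50 r)).foldl (stepU chunk) q := by
  have e1 : ∀ p, (PySem.List.pyRange 0 (min 0x10 r)).foldl (stepAm chunk) p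
      = (PySem.List.pyRange 0 (min 0x10 r)).foldl (stepU chunk) p := by
    intro p
    apply PySem.List.foldl_congr_mem
    intro acc x hx
    obtain ⟨h1, h2⟩ := PySem.List.mem_pyRange_one.mp hx
    simp [stepAm, stepU, fsel, ksel, show x < 0x10 by omega, show x < 0x14 by omega]
  have e2 : ∀ p, (PySem.List.pyRange 0x10 (min 0x14 r)).foldl (stepAs fch kc1) p
      = (PySem.List.pyRange 0x10 (min 0x14 r)).foldl (stepU chunk) p := by
    intro p
    apply PySem.List.foldl_congr_mem
    intro acc x hx
    obtain ⟨h1, h2⟩ := PySem.List.mem_pyRange_one.mp hx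
    simp [stepAs, stepU, fsel, ksel, show ¬(x < 0x10) by omega, show x < 0x14 by omega]
  have e3 : ∀ p, (PySem.List.pyRange 0x14 (min 0x28 r)).foldl (stepAs fpar kc2) p
      = (PySem.List.pyRange 0x14 (min 0x28 r)).foldl (stepU chunk) p := by
    intro p
    apply PySem.List.foldl_congr_mem
    intro acc x hx
    obtain ⟨h1, h2⟩ := PySem.List.mem_pyRange_one.mp hx
    simp [stepAs, stepU, fsel, ksel, show ¬(x < 0x10) by omega, show ¬(x < 0x14) by omega,
      show x < 0x28 by omega]
  have e4 : ∀ p, (PySem.List.pyRange 0x28 (min 0x3C r)).foldl (stepAs fmaj kc3) p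
      = (PySem.List.pyRange 0x28 (min 0x3C r)).foldl (stepU chunk) p := by
    intro p
    apply PySem.List.foldl_congr_mem
    intro acc x hx
    obtain ⟨h1, h2⟩ := PySem.List.mem_pyRange_one.mp hx
    simp [stepAs, stepU, fsel, ksel, show ¬(x < 0x10) by omega, show ¬(x < 0x14) by omega,
      show ¬(x < 0x28) by omega, show x < 0x3C by omega]
  have e5 : ∀ p, (PySem.List.pyRange 0x3C (min 0x50 r)).foldl (stepAs fpar kc4) p
      = (PySem.List.pyRange 0x3C (min 0x50 r)).foldl (stepU chunk) p := by
    intro p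
    apply PySem.List.foldl_congr_mem
    intro acc x hx
    obtain ⟨h1, h2⟩ := PySem.List.mem_pyRange_one.mp hx
    simp [stepAs, stepU, fsel, ksel, show ¬(x < 0x10) by omega, show ¬(x < 0x14) by omega,
      show ¬(x < 0x28) by omega, show ¬(x < 0x3C) by omega]
  have hsplit : PySem.List.pyRange 0 (min 0x50 r)
      = PySem.List.pyRange 0 (min 0x10 r) ++ (PySem.List.pyRange 0x10 (min 0x14 r)
        ++ (PySem.List.pyRange 0x14 (min 0x28 r) ++ (PySem.List.pyRange 0x28 (min 0x3C r)
          ++ PySem.List.pyRange 0x3C (min 0x50 r)))) := by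
    rw [seg 0 0x10 0x50 r (by omega) (by omega), seg 0x10 0x14 0x50 r (by omega) (by omega),
      seg 0x14 0x28 0x50 r (by omega) (by omega), seg 0x28 0x3C 0x50 r (by omega) (by omega)]
  rw [e1, e2, e3, e4, e5, hsplit]
  simp [List.foldl_append]

def Wp (chunk : List Int) (m : Nat) : List Int :=
  (PySem.List.pyRange 0 (m : Int)).foldl (bstep chunk) []

def wv (chunk : List Int) (m : Nat) : Int :=
  if (m : Int) < 0x10 then msgword chunk (m : Int) else schedword (Wp chunk m) (m : Int)

lemma Wp_succ (chunk : List Int) (m : Nat) :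
    Wp chunk (m + 1) = Wp chunk m ++ [wv chunk m] := by
  have h : ((m + 1 : Nat) : Int) = (m : Int) + 1 := by push_cast; ring
  rw [Wp, h, PySem.List.pyRange_one_succ_right (Int.natCast_nonneg m), List.foldl_append]
  rfl

lemma Wp_len (chunk : List Int) (m : Nat) : (Wp chunk m).length = m := by
  induction m with
  | zero => rw [Wp, PySem.List.pyRange_one_eq_nil (by simp)]; rfl
  | succ m ih => rw [Wp_succ, List.length_append, ih]; rfl

lemma Wp_getD (chunk : List Int) {j m : Nat} (h : j < m) :
    (Wp chunk m).getD j 0 = wv chunk j := by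
  induction m with
  | zero => omega
  | succ m ih =>
    rw [Wp_succ]
    rcases Nat.lt_or_ge j m with h' | h'
    · rw [List.getD_append _ _ _ _ (by rw [Wp_len]; omega), ih h']
    · have hj : j = m := by omega
      subst hj
      rw [List.getD_append_right _ _ _ _ (by rw [Wp_len]), Wp_len]
      simp

def ow (chunk : List Int) (w : List Int) : Nat → List Int
  | 0 => w
  | m + 1 => (ow chunk w m).set m (wv chunk m)

lemma ow_len (chunk : List Int) (w : List Int) (m : Nat) : (ow chunk w m).length = w.length := by
  induction m with
  | zero => rfl
  | succ m ih => rw [ow, List.length_set, ih]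

lemma ow_getD (chunk : List Int) (w : List Int) {j m : Nat} (hw : w.length = 80)
    (hj : j < m) (hj80 : j < 80) : (ow chunk w m).getD j 0 = wv chunk j := by
  induction m with
  | zero => omega
  | succ m ih =>
    rcases Nat.lt_or_ge j m with h' | h'
    · rw [ow, List.getD_eq_getElem?_getD, List.getElem?_set_ne (by omega),
        ← List.getD_eq_getElem?_getD, ih h']
    · have hj' : j = m := by omega
      subst hj'
      rw [ow, List.getD_eq_getElem?_getD, List.getElem?_set_self (by rw [ow_len, hw]; omega)]
      rfl

lemma inv (chunk : List Int) (Ln : Nat) (hL : Ln ≤ 80) :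
    ∀ (m : Nat), m ≤ Ln → ∀ (st : St) (w : List Int), w.length = 80 →
      (PySem.List.pyRange 0 (m : Int)).foldl (stepU chunk) (st, w)
        = ((PySem.List.pyRange 0 (m : Int)).foldl (compress (Wp chunk Ln)) st, ow chunk w m) := by
  intro m
  induction m with
  | zero =>
    intro _ st w hw
    rw [PySem.List.pyRange_one_eq_nil (by simp)]
    rfl
  | succ m ih =>
    intro hm st w hw
    have hcast : ((m + 1 : Nat) : Int) = (m : Int) + 1 := by push_cast; ring
    rw [hcast, PySem.List.pyRange_one_succ_right (Int.natCast_nonneg m), List.foldl_append,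
      List.foldl_append, ih (by omega) st w hw]
    simp only [List.foldl_cons, List.foldl_nil]
    set X := (PySem.List.pyRange 0 (m : Int)).foldl (compress (Wp chunk Ln)) st with hX
    have hread : ∀ j : Int, 0 ≤ j → j < (m : Int) → j < 80 →
        PySem.List.pyGetD (ow chunk w m) j 0 = PySem.List.pyGetD (Wp chunk m) j 0 := by
      intro j h0 hjm hj80
      obtain ⟨jn, rfl⟩ : ∃ jn : Nat, j = (jn : Int) := ⟨j.toNat, (Int.toNat_of_nonneg h0).symm⟩
      rw [PySem.List.pyGetD_natCast, PySem.List.pyGetD_natCast,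
        ow_getD chunk w hw (by exact_mod_cast hjm) (by exact_mod_cast hj80),
        Wp_getD chunk (by exact_mod_cast hjm)]
    have hwj : (if (m : Int) < 0x10 then msgword chunk (m : Int)
        else schedword (ow chunk w m) (m : Int)) = wv chunk m := by
      by_cases h16 : (m : Int) < 0x10
      · rw [if_pos h16, wv, if_pos h16]
      · rw [if_neg h16, wv, if_neg h16]
        unfold schedword
        rw [hread ((m : Int) - 3) (by omega) (by omega) (by omega),
          hread ((m : Int) - 8) (by omega) (by omega) (by omega),
          hread ((m : Int) - 0xE) (by omega) (by omega) (by omega),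
          hread ((m : Int) - 0x10) (by omega) (by omega) (by omega)]
    have hW : PySem.List.pyGetD (Wp chunk Ln) (m : Int) 0 = wv chunk m := by
      rw [PySem.List.pyGetD_natCast, Wp_getD chunk (by omega)]
    have hC : compress (Wp chunk Ln) X (m : Int)
        = roundUpd X (fsel (m : Int) X.2.1 X.2.2.1 X.2.2.2.1) (ksel (m : Int)) (wv chunk m) := by
      simp only [compress, hW]
    calc stepU chunk (X, ow chunk w m) (m : Int)
        = (roundUpd X (fsel (m : Int) X.2.1 X.2.2.1 X.2.2.2.1) (ksel (m : Int)) (wv chunk m),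
            PySem.List.pySetD (ow chunk w m) (m : Int) (wv chunk m)) := by
          simp only [stepU]
          rw [hwj]
      _ = (compress (Wp chunk Ln) X (m : Int), ow chunk w (m + 1)) := by
          rw [hC]
          simp [PySem.List.pySetD_natCast, ow]

lemma block_eq (bs : List Int) (r : Int) (H : St) (w : List Int) (hw : w.length = 80) (i : Int) :
    blockA bs r (H, w) i
      = (blockT bs (min 0x50 r) H i,
         ow (PySem.List.slice bs (some (i <<< (6:Nat))) (some ((i + 1) <<< (6:Nat)))) w
           (min 0x50 r).toNat) := by
  have hr : PySem.List.pyRange 0 (min 0x50 r)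
      = PySem.List.pyRange 0 (((min 0x50 r).toNat : Nat) : Int) := by
    by_cases h : 0 ≤ min 0x50 r
    · rw [Int.toNat_of_nonneg h]
    · rw [PySem.List.pyRange_one_eq_nil (by omega), PySem.List.pyRange_one_eq_nil (by omega)]
  simp only [blockA, blockT]
  rw [chain_eq, hr, inv _ (min 0x50 r).toNat (by omega) (min 0x50 r).toNat le_rfl H w hw]
  rfl

lemma outer (bs : List Int) (r : Int) :
    ∀ (is : List Int) (H : St) (w : List Int), w.length = 80 →
      (is.foldl (blockA bs r) (H, w)).1 = is.foldl (blockT bs (min 0x50 r)) H := by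
  intro is
  induction is with
  | nil => intro H w hw; rfl
  | cons i t ih =>
    intro H w hw
    simp only [List.foldl_cons]
    rw [block_eq bs r H w hw i]
    exact ih _ _ (by rw [ow_len, hw])

-- ---- bridging the tuple compression to B's append-only sequence ----

lemma band_mask_range (a : Int) :
    0 ≤ PySem.Int.band a 0xFFFFFFFF ∧ PySem.Int.band a 0xFFFFFFFF < 4294967296 := by
  by_cases h : 0 ≤ a
  · rw [PySem.Int.band_of_nonneg h (by norm_num)]
    have hlt := Nat.and_lt_two_pow a.toNat (show (0xFFFFFFFF:Int).toNat < 2^32 by decide)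
    constructor
    · exact Int.natCast_nonneg _
    · exact_mod_cast hlt
  · simp only [PySem.Int.band]
    rw [if_neg h, if_pos (by norm_num)]
    have h1 : (0xFFFFFFFF:Int).toNat = 4294967295 := by decide
    have h2 := Nat.sub_le ((0xFFFFFFFF:Int).toNat) ((0xFFFFFFFF:Int).toNat &&& (-a-1).toNat)
    constructor
    · exact Int.natCast_nonneg _
    · omega

lemma natrot (n : Nat) (hn : n < 2^32) :
    ((((((n <<< 2) &&& 4294967295) ||| (n >>> 30)) <<< 30) &&& 4294967295) |||
      ((((n <<< 2) &&& 4294967295) ||| (n >>> 30)) >>> 2)) = n := by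
  have e : (4294967295 : Nat) = 2^32 - 1 := by norm_num
  rw [e]
  have hbit : ∀ m, 32 ≤ m → n.testBit m = false := by
    intro m hm
    apply Nat.testBit_lt_two_pow
    calc n < 2^32 := hn
      _ ≤ 2^m := Nat.pow_le_pow_right (by norm_num) hm
  apply Nat.eq_of_testBit_eq
  intro j
  simp only [Nat.testBit_or, Nat.testBit_and, Nat.testBit_shiftLeft, Nat.testBit_shiftRight,
    Nat.testBit_two_pow_sub_one]
  by_cases h32 : j < 32
  · by_cases h30 : j < 30
    · simp [show ¬ (j ≥ 30) by omega, show 2 + j - 2 = j by omega, show (2:Nat) + j ≥ 2 by omega,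
        show 2 + j < 32 by omega, hbit (30 + (2 + j)) (by omega)]
    · have hx : 30 + (j - 30) = j := by omega
      simp [show j ≥ 30 by omega, h32, show ¬ (j - 30 ≥ 2) by omega, hx,
        show ¬ (2 + j < 32) by omega, hbit (30 + (2 + j)) (by omega)]
  · simp [show ¬ (j < 32) by omega, show ¬ (2 + j < 32) by omega,
      hbit (30 + (2 + j)) (by omega), hbit j (by omega)]

lemma rot2_30 (x : Int) (hx0 : 0 ≤ x) (hx1 : x < 4294967296) : rotl (rotl x 2) 30 = x := by
  obtain ⟨n, rfl⟩ : ∃ n : Nat, x = (n : Int) := ⟨x.toNat, (Int.toNat_of_nonneg hx0).symm⟩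
  have hn : n < 2^32 := by exact_mod_cast hx1
  have c1 : ((2:Int)).toNat = 2 := by decide
  have c2 : ((0x20 - (2:Int))).toNat = 30 := by decide
  have c3 : ((0x20 - (30:Int))).toNat = 2 := by decide
  have c4 : ((30:Int)).toNat = 30 := by decide
  have hM : (0xFFFFFFFF : Int) = ((4294967295 : Nat) : Int) := by norm_num
  have sL : ∀ (a k : Nat), ((a:Int) <<< k) = ((a <<< k : Nat) : Int) := by
    intro a k; exact_mod_cast (Int.natCast_shiftLeft a k)
  have sR : ∀ (a k : Nat), ((a:Int) >>> k) = ((a >>> k : Nat) : Int) := by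
    intro a k; exact_mod_cast (Int.natCast_shiftRight a k)
  simp only [rotl, c1, c2, c3, c4, hM, sL, sR, PySem.Int.band_natCast, PySem.Int.bor_natCast]
  exact_mod_cast natrot n hn

def selem (w s : List Int) (t : Int) : Int :=
  PySem.Int.band (rotl (PySem.List.pyGetD s (t + 4) 0) 5
    + fsel t (PySem.List.pyGetD s (t + 3) 0) (rotl (PySem.List.pyGetD s (t + 2) 0) 0x1E)
        (rotl (PySem.List.pyGetD s (t + 1) 0) 0x1E)
    + rotl (PySem.List.pyGetD s t 0) 0x1E + ksel t + PySem.List.pyGetD w t 0) 0xFFFFFFFF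

lemma sstep_eq (w s : List Int) (t : Int) : sstep w s t = s ++ [selem w s t] := by
  simp only [sstep, selem, fsel, ksel]
  split_ifs <;> rfl

def Sp (w s0 : List Int) (m : Nat) : List Int :=
  (PySem.List.pyRange 0 (m : Int)).foldl (sstep w) s0

lemma Sp_succ (w s0 : List Int) (m : Nat) :
    Sp w s0 (m + 1) = Sp w s0 m ++ [selem w (Sp w s0 m) (m : Int)] := by
  have h : ((m + 1 : Nat) : Int) = (m : Int) + 1 := by push_cast; ring
  rw [Sp, h, PySem.List.pyRange_one_succ_right (Int.natCast_nonneg m), List.foldl_append]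
  simp only [List.foldl_cons, List.foldl_nil]
  rw [sstep_eq]
  rfl

lemma Sp_len (w s0 : List Int) (m : Nat) : (Sp w s0 m).length = m + s0.length := by
  induction m with
  | zero => rw [Sp, PySem.List.pyRange_one_eq_nil (by simp)]; simp
  | succ m ih =>
    rw [Sp_succ, List.length_append, ih]
    simp only [List.length_cons, List.length_nil]
    omega

lemma Sp_mono (w s0 : List Int) {m m' j : Nat} (hmm : m ≤ m') (hj : j < m + s0.length) :
    (Sp w s0 m').getD j 0 = (Sp w s0 m).getD j 0 := by
  induction m' with
  | zero =>
    have : m = 0 := by omega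
    subst this; rfl
  | succ m' ih =>
    rcases Nat.lt_or_ge m (m' + 1) with h' | h'
    · rw [Sp_succ, List.getD_append _ _ _ _ (by rw [Sp_len]; omega), ih (by omega)]
    · have : m = m' + 1 := by omega
      subst this; rfl

lemma binv (w : List Int) (h0 h1 h2 h3 h4 : Int)
    (r2 : 0 ≤ h2 ∧ h2 < 4294967296) (r3 : 0 ≤ h3 ∧ h3 < 4294967296)
    (r4 : 0 ≤ h4 ∧ h4 < 4294967296) (Ln : Nat) :
    ∀ (m : Nat), m ≤ Ln →
      (PySem.List.pyRange 0 (m : Int)).foldl (compress w) (h0, h1, h2, h3, h4)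
        = ((Sp w [rotl h4 2, rotl h3 2, rotl h2 2, h1, h0] Ln).getD (m + 4) 0,
           (Sp w [rotl h4 2, rotl h3 2, rotl h2 2, h1, h0] Ln).getD (m + 3) 0,
           rotl ((Sp w [rotl h4 2, rotl h3 2, rotl h2 2, h1, h0] Ln).getD (m + 2) 0) 0x1E,
           rotl ((Sp w [rotl h4 2, rotl h3 2, rotl h2 2, h1, h0] Ln).getD (m + 1) 0) 0x1E,
           rotl ((Sp w [rotl h4 2, rotl h3 2, rotl h2 2, h1, h0] Ln).getD m 0) 0x1E) := by
  set s0 : List Int := [rotl h4 2, rotl h3 2, rotl h2 2, h1, h0] with hs0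
  have hs0len : s0.length = 5 := by rw [hs0]; rfl
  intro m
  induction m with
  | zero =>
    intro _
    rw [PySem.List.pyRange_one_eq_nil (by simp)]
    simp only [List.foldl_nil]
    have g : ∀ (j : Nat), j < 5 → (Sp w s0 Ln).getD j 0 = s0.getD j 0 := by
      intro j hj
      rw [Sp_mono w s0 (Nat.zero_le Ln) (by rw [hs0len]; omega), Sp,
        PySem.List.pyRange_one_eq_nil (by simp)]
      rfl
    rw [g (0+4) (by omega), g (0+3) (by omega), g (0+2) (by omega), g (0+1) (by omega),
      g 0 (by omega), hs0]
    simp [rot2_30 h2 r2.1 r2.2, rot2_30 h3 r3.1 r3.2, rot2_30 h4 r4.1 r4.2]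
  | succ m ih =>
    intro hm
    have hcast : ((m + 1 : Nat) : Int) = (m : Int) + 1 := by push_cast; ring
    rw [hcast, PySem.List.pyRange_one_succ_right (Int.natCast_nonneg m), List.foldl_append,
      ih (by omega)]
    simp only [List.foldl_cons, List.foldl_nil]
    have hGnew : (Sp w s0 Ln).getD (m + 5) 0 = selem w (Sp w s0 m) (m : Int) := by
      rw [Sp_mono w s0 (show m + 1 ≤ Ln by omega) (by rw [hs0len]; omega), Sp_succ,
        List.getD_append_right _ _ _ _ (by rw [Sp_len, hs0len])]
      simp [Sp_len, hs0len]
    have hrd4 : PySem.List.pyGetD (Sp w s0 m) ((m : Int) + 4) 0 = (Sp w s0 Ln).getD (m + 4) 0 := by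
      rw [show (m : Int) + 4 = ((m + 4 : Nat) : Int) by push_cast; ring,
        PySem.List.pyGetD_natCast, Sp_mono w s0 (show m ≤ Ln by omega) (by rw [hs0len]; omega)]
    have hrd3 : PySem.List.pyGetD (Sp w s0 m) ((m : Int) + 3) 0 = (Sp w s0 Ln).getD (m + 3) 0 := by
      rw [show (m : Int) + 3 = ((m + 3 : Nat) : Int) by push_cast; ring,
        PySem.List.pyGetD_natCast, Sp_mono w s0 (show m ≤ Ln by omega) (by rw [hs0len]; omega)]
    have hrd2 : PySem.List.pyGetD (Sp w s0 m) ((m : Int) + 2) 0 = (Sp w s0 Ln).getD (m + 2) 0 := by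
      rw [show (m : Int) + 2 = ((m + 2 : Nat) : Int) by push_cast; ring,
        PySem.List.pyGetD_natCast, Sp_mono w s0 (show m ≤ Ln by omega) (by rw [hs0len]; omega)]
    have hrd1 : PySem.List.pyGetD (Sp w s0 m) ((m : Int) + 1) 0 = (Sp w s0 Ln).getD (m + 1) 0 := by
      rw [show (m : Int) + 1 = ((m + 1 : Nat) : Int) by push_cast; ring,
        PySem.List.pyGetD_natCast, Sp_mono w s0 (show m ≤ Ln by omega) (by rw [hs0len]; omega)]
    have hrd0 : PySem.List.pyGetD (Sp w s0 m) ((m : Int)) 0 = (Sp w s0 Ln).getD m 0 := by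
      rw [PySem.List.pyGetD_natCast, Sp_mono w s0 (show m ≤ Ln by omega) (by rw [hs0len]; omega)]
    have hsel : selem w (Sp w s0 m) (m : Int)
        = PySem.Int.band (rotl ((Sp w s0 Ln).getD (m + 4) 0) 5
            + fsel (m : Int) ((Sp w s0 Ln).getD (m + 3) 0)
                (rotl ((Sp w s0 Ln).getD (m + 2) 0) 0x1E)
                (rotl ((Sp w s0 Ln).getD (m + 1) 0) 0x1E)
            + rotl ((Sp w s0 Ln).getD m 0) 0x1E + ksel (m : Int)
            + PySem.List.pyGetD w (m : Int) 0) 0xFFFFFFFF := by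
      simp only [selem, hrd4, hrd3, hrd2, hrd1, hrd0]
    simp only [compress, roundUpd]
    rw [hGnew, hsel]

lemma blockT_eq_blockB (bs : List Int) (Ln : Nat) (H : St)
    (r2 : 0 ≤ H.2.2.1 ∧ H.2.2.1 < 4294967296) (r3 : 0 ≤ H.2.2.2.1 ∧ H.2.2.2.1 < 4294967296)
    (r4 : 0 ≤ H.2.2.2.2 ∧ H.2.2.2.2 < 4294967296) (i : Int) :
    blockT bs ((Ln : Nat) : Int) H i = blockB bs ((Ln : Nat) : Int) H i := by
  obtain ⟨H0, H1, H2, H3, H4⟩ := H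
  simp only [blockT, blockB]
  rw [binv _ H0 H1 H2 H3 H4 r2 r3 r4 Ln Ln le_rfl]
  have c4 : ((Ln : Nat) : Int) + 4 = ((Ln + 4 : Nat) : Int) := by push_cast; ring
  have c3 : ((Ln : Nat) : Int) + 3 = ((Ln + 3 : Nat) : Int) := by push_cast; ring
  have c2 : ((Ln : Nat) : Int) + 2 = ((Ln + 2 : Nat) : Int) := by push_cast; ring
  have c1 : ((Ln : Nat) : Int) + 1 = ((Ln + 1 : Nat) : Int) := by push_cast; ring
  rw [c4, c3, c2, c1]
  simp only [PySem.List.pyGetD_natCast, Sp]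

def Hrange (q : St) : Prop :=
  (0 ≤ q.2.2.1 ∧ q.2.2.1 < 4294967296) ∧ (0 ≤ q.2.2.2.1 ∧ q.2.2.2.1 < 4294967296)
    ∧ (0 ≤ q.2.2.2.2 ∧ q.2.2.2.2 < 4294967296)

lemma blockB_range (bs : List Int) (L : Int) (H : St) (i : Int) : Hrange (blockB bs L H i) := by
  exact ⟨band_mask_range _, band_mask_range _, band_mask_range _⟩

lemma range_eq (r : Int) :
    PySem.List.pyRange 0 (min 0x50 r)
      = PySem.List.pyRange 0 ((((min 0x50 (max 0 r)).toNat : Nat) : Int)) := by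
  by_cases h : 0 ≤ r
  · have h1 : min 0x50 (max 0 r) = min 0x50 r := by omega
    have h2 : 0 ≤ min 0x50 r := by omega
    rw [h1, Int.toNat_of_nonneg h2]
  · rw [PySem.List.pyRange_one_eq_nil (by omega),
      PySem.List.pyRange_one_eq_nil (by omega)]

lemma limit_eq (r : Int) : min 0x50 (max 0 r) = (((min 0x50 (max 0 r)).toNat : Nat) : Int) :=
  (Int.toNat_of_nonneg (by omega)).symm

lemma outer2 (bs : List Int) (r : Int) :
    ∀ (is : List Int) (H : St), Hrange H →
      is.foldl (blockT bs (min 0x50 r)) H = is.foldl (blockB bs (min 0x50 (max 0 r))) H := by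
  intro is
  induction is with
  | nil => intro H _; rfl
  | cons i t ih =>
    intro H hH
    simp only [List.foldl_cons]
    have hT : blockT bs (min 0x50 r) H i
        = blockT bs ((((min 0x50 (max 0 r)).toNat : Nat) : Int)) H i := by
      simp only [blockT]
      rw [range_eq r]
    have hB : blockB bs (min 0x50 (max 0 r)) H i
        = blockB bs ((((min 0x50 (max 0 r)).toNat : Nat) : Int)) H i := by
      rw [← limit_eq r]
    rw [hT, hB, blockT_eq_blockB bs _ H hH.1 hH.2.1 hH.2.2 i]
    exact ih _ (blockB_range bs _ H i)

lemma ports_eq : ∀ bytes rounds, sha1bytes bytes rounds = sha1bytes_alt bytes rounds := by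
  intro bytes rounds
  simp only [sha1bytes, sha1bytes_alt]
  rw [outer (pad bytes) rounds _ _ (PySem.List.pyRepeat [0] 0x50)
    (by simp [PySem.List.pyRepeat_singleton]),
    outer2 (pad bytes) rounds _ _ (by norm_num [Hrange])]

-- ===== VERDICT (by name: the statement is the Claim_ definition above) =====
theorem sha1bytes_spec : Claim_equal_sha1bytes := by
  intro bytes rounds _
  unfold Spec_sha1bytes
  exact ports_eq bytes rounds
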